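-- pv_equiv track=rewrite | github.com/quzhixuekimi/chan.py | user_strategy_v6_bspzs/event_engine.py | map_bsp_event_type
-- ===== SOURCE A (Python) =====
-- def map_bsp_event_type(types: list[str], is_buy: bool) -> str | None:
--   norm_types = {str(x).strip().lower() for x in (types or []) if str(x).strip()}
--   side = "BUY" if is_buy else "SELL"
--   if "1" in norm_types:
--     return f"BSP1_{side}"
--   if "2" in norm_types:
--     return f"BSP2_{side}"
--   if "3a" in norm_types or "3b" in norm_types:
--     return f"BSP3_{side}"
--   return None
-- ===== SOURCE B (Python) =====
-- _BSP_RANK = {"1": 1, "2": 2, "3a": 3, "3b": 3}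
--
-- def map_bsp_event_type(types, is_buy):
--     best = None
--     for x in (types or []):
--         r = _BSP_RANK.get(str(x).strip().lower())
--         if r is not None and (best is None or r < best):
--             best = r
--     if best is None:
--         return None
--     return f"BSP{best}_{'BUY' if is_buy else 'SELL'}"
-- ===== Notes on version B (the rewrite author's own statement) =====
-- stated objective: alternative
-- what changed: Replaces the set comprehension plus ordered chain of membership tests by a single pass that keeps the minimum rank from a token->rank map and renders the event string from that rank at the end.
import Mathlib
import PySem

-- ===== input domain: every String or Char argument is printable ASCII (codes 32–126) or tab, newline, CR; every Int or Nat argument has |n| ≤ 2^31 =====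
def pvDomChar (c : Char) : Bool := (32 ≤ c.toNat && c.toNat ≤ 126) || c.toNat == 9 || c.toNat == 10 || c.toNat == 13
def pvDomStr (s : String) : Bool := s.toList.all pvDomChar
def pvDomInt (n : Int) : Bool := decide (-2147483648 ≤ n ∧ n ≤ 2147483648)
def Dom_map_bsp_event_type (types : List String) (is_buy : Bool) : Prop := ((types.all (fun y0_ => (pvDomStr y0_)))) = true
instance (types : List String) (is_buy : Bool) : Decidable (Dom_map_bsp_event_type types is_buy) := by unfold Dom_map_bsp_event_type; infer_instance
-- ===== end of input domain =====

-- B replaces A's set comprehension + ordered membership chain by a one-pass minimum-rank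
-- scan over a token→rank map; same return value everywhere (objective: alternative).

-- ===== PORT A =====
def map_bsp_event_type (types : List String) (is_buy : Bool) : Option String :=
  -- {str(x).strip().lower() for x in (types or []) if str(x).strip()}
  let norm_types : PySem.Set String :=
    PySem.Set.ofList ((types.filter (fun x => PySem.Str.strip x != "")).map
      (fun x => PySem.Str.lower (PySem.Str.strip x)))
  let side := if is_buy then "BUY" else "SELL"
  if PySem.Set.contains norm_types "1" then some ("BSP1_" ++ side)
  else if PySem.Set.contains norm_types "2" then some ("BSP2_" ++ side)
  else if PySem.Set.contains norm_types "3a" || PySem.Set.contains norm_types "3b" then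
    some ("BSP3_" ++ side)
  else none

-- ===== PORT B =====
def bspRankDict : PySem.Dict String Int := PySem.Dict.ofList [("1", (1 : Int)), ("2", 2), ("3a", 3), ("3b", 3)]

def map_bsp_event_type_alt (types : List String) (is_buy : Bool) : Option String :=
  let best : Option Int := types.foldl (fun best x =>
    match PySem.Dict.get? bspRankDict (PySem.Str.lower (PySem.Str.strip x)) with
    | none => best
    | some r =>
      match best with
      | none => some r
      | some b => if r < b then some r else some b) none
  match best with
  | none => none
  | some b => some ("BSP" ++ PySem.Int.toStr b ++ "_" ++ (if is_buy then "BUY" else "SELL"))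

-- ===== PRECONDITION & SPEC =====
def Spec_map_bsp_event_type (types : List String) (is_buy : Bool) (out : Option String) : Prop := out = map_bsp_event_type_alt types is_buy
instance (types : List String) (is_buy : Bool) (out : Option String) : Decidable (Spec_map_bsp_event_type types is_buy out) := by unfold Spec_map_bsp_event_type; infer_instance

-- ===== CLAIM (what is proved, stated in full; the proofs are below) =====
def Claim_equal_map_bsp_event_type : Prop := ∀ (types : List String) (is_buy : Bool), Dom_map_bsp_event_type types is_buy → Spec_map_bsp_event_type types is_buy (map_bsp_event_type types is_buy)

-- ===== LEMMAS AND PROOFS =====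

/-- normalized token -/
def nrmTok (x : String) : String := PySem.Str.lower (PySem.Str.strip x)

/-- rank of a raw token in B -/
def rankTok (x : String) : Option Int := PySem.Dict.get? bspRankDict (nrmTok x)

/-- option-min used by B's fold step -/
def omin (a b : Option Int) : Option Int :=
  match b with
  | none => a
  | some r =>
    match a with
    | none => some r
    | some b' => if r < b' then some r else some b'

lemma step_eq_omin (best : Option Int) (x : String) :
    (match PySem.Dict.get? bspRankDict (PySem.Str.lower (PySem.Str.strip x)) with
     | none => best
     | some r =>
       match best with
       | none => some r
       | some b => if r < b then some r else some b) = omin best (rankTok x) := by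
  simp only [rankTok, nrmTok, omin]

lemma omin_some_some (a r : Int) : omin (some a) (some r) = some (min a r) := by
  simp only [omin]; split_ifs <;> simp only [Option.some.injEq] <;> omega

lemma omin_none_left (b : Option Int) : omin none b = b := by cases b <;> rfl

lemma omin_none_right (a : Option Int) : omin a none = a := rfl

lemma omin_assoc (a b c : Option Int) : omin (omin a b) c = omin a (omin b c) := by
  cases a <;> cases b <;> cases c <;>
    simp only [omin_some_some, omin_none_left, omin_none_right, min_assoc]

def minRank (ts : List String) : Option Int :=
  ts.foldl (fun a x => omin a (rankTok x)) none

lemma foldl_omin (ts : List String) (acc : Option Int) :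
    ts.foldl (fun a x => omin a (rankTok x)) acc = omin acc (minRank ts) := by
  induction ts generalizing acc with
  | nil => simp [minRank, omin]
  | cons x ts ih =>
    rw [List.foldl_cons, ih]
    conv_rhs => rw [minRank, List.foldl_cons]
    rw [show List.foldl (fun a x => omin a (rankTok x)) (omin none (rankTok x)) ts
        = omin (omin none (rankTok x)) (minRank ts) from ih _,
      omin_none_left, omin_assoc]

lemma minRank_cons (x : String) (ts : List String) :
    minRank (x :: ts) = omin (rankTok x) (minRank ts) := by
  conv_lhs => rw [minRank, List.foldl_cons]
  rw [foldl_omin, omin_none_left]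

lemma rankTok_char (x : String) :
    rankTok x = if nrmTok x = "1" then some 1
      else if nrmTok x = "2" then some 2
      else if nrmTok x = "3a" ∨ nrmTok x = "3b" then some 3
      else none := by
  simp only [rankTok]
  generalize nrmTok x = s
  have hd : bspRankDict = PySem.Dict.mk [("1", 1), ("2", 2), ("3a", 3), ("3b", 3)] := by decide
  by_cases h1 : s = "1"
  · subst h1; decide
  by_cases h2 : s = "2"
  · subst h2; decide
  by_cases h3 : s = "3a"
  · subst h3; decide
  by_cases h4 : s = "3b"
  · subst h4; decide
  simp [hd, PySem.Dict.get?_mk_cons, beq_iff_eq, h1, h2, h3, h4,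
    Ne.symm h1, Ne.symm h2, Ne.symm h3, Ne.symm h4, PySem.Dict.get?]

lemma minRank_char (ts : List String) :
    minRank ts =
      if ts.any (fun x => nrmTok x == "1") then some 1
      else if ts.any (fun x => nrmTok x == "2") then some 2
      else if ts.any (fun x => nrmTok x == "3a" || nrmTok x == "3b") then some 3
      else none := by
  induction ts with
  | nil => simp [minRank]
  | cons x ts ih =>
    rw [minRank_cons, ih, rankTok_char]
    by_cases h1 : nrmTok x = "1"
    · simp [h1, omin] <;> split_ifs <;> simp [omin]
    · by_cases h2 : nrmTok x = "2"
      · simp [h1, h2, omin] <;> split_ifs <;> simp [omin]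
      · by_cases h3 : nrmTok x = "3a"
        · simp [h1, h2, h3, omin] <;> split_ifs <;> simp [omin]
        · by_cases h4 : nrmTok x = "3b"
          · simp [h1, h2, h3, h4, omin] <;> split_ifs <;> simp [omin]
          · simp only [List.any_cons, beq_iff_eq, h1, h2, h3, h4, decide_false,
              Bool.false_or, decide_eq_true_eq, or_self, Bool.false_or]
            simp [h1, h2, h3, h4]
            split_ifs <;> rfl

lemma lower_empty : PySem.Str.lower "" = "" := by decide

lemma contains_normA (ts : List String) (s : String) (hs : s ≠ "") :
    PySem.Set.contains
      (PySem.Set.ofList ((ts.filter (fun x => PySem.Str.strip x != "")).map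
        (fun x => PySem.Str.lower (PySem.Str.strip x)))) s
      = ts.any (fun x => nrmTok x == s) := by
  rw [Bool.eq_iff_iff, PySem.Set.contains_iff, List.any_eq_true]
  simp only [PySem.Set.mem_ofList, List.mem_map, List.mem_filter, bne_iff_ne, ne_eq]
  constructor
  · rintro ⟨x, ⟨hx, _⟩, hs'⟩
    exact ⟨x, hx, by simp [nrmTok, hs']⟩
  · rintro ⟨x, hx, hs'⟩
    have hxe : nrmTok x = s := by simpa using hs'
    refine ⟨x, ⟨hx, ?_⟩, by simpa [nrmTok] using hs'⟩
    intro he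
    apply hs
    rw [← hxe]
    simp [nrmTok, he, lower_empty]

-- ===== VERDICT (by name: the statement is the Claim_ definition above) =====
theorem map_bsp_event_type_spec : Claim_equal_map_bsp_event_type := by
  intro types is_buy _
  unfold Spec_map_bsp_event_type map_bsp_event_type map_bsp_event_type_alt
  simp only [step_eq_omin]
  rw [show (types.foldl (fun a x => omin a (rankTok x)) none) = minRank types from rfl,
    minRank_char,
    contains_normA types "1" (by decide),
    contains_normA types "2" (by decide),
    contains_normA types "3a" (by decide),
    contains_normA types "3b" (by decide)]
  have hor : (types.any (fun x => nrmTok x == "3a") || types.any (fun x => nrmTok x == "3b"))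
      = types.any (fun x => nrmTok x == "3a" || nrmTok x == "3b") := by
    rw [Bool.eq_iff_iff]; simp only [Bool.or_eq_true, List.any_eq_true]
    constructor
    · rintro (⟨x, hx, h⟩ | ⟨x, hx, h⟩) <;> exact ⟨x, hx, by simp [h]⟩
    · rintro ⟨x, hx, h⟩
      rcases h with h | h
      exacts [Or.inl ⟨x, hx, h⟩, Or.inr ⟨x, hx, h⟩]
  rw [hor]
  cases is_buy <;> split_ifs <;> decide
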